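-- pv_equiv track=rewrite | github.com/torrottum/advent-of-code | 04/04.py | check_phrase
-- ===== SOURCE A (Python) =====
-- def check_phrase(words):
--     l = len(words)
--     x = l * -1
--     for i in range(l):
--         for j in range(l):
--             if sorted(words[i]) == sorted(words[j]):
--                 x += 1
--     return not x > 0
-- ===== SOURCE B (Python) =====
-- def check_phrase(words):
--     signatures = sorted(sorted(w) for w in words)
--     return all(a != b for a, b in zip(signatures, signatures[1:]))
-- ===== Notes on version B (the rewrite author's own statement) =====
-- stated objective: faster
-- what changed: Replaces A's nested all-pairs scan with counter arithmetic by sorting the per-word anagram signatures once and returning False iff two adjacent sorted signatures are equal.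
import Mathlib
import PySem

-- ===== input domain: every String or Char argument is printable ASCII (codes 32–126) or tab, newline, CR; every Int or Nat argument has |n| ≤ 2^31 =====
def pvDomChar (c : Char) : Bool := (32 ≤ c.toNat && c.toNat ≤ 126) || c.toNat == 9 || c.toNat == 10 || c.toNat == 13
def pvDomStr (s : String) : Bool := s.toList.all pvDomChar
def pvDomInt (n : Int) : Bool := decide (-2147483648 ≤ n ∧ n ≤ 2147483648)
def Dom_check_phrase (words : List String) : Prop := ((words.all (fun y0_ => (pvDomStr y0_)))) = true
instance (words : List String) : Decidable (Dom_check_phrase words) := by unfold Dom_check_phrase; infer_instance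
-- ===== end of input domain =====

-- B sorts the per-word anagram signatures once and checks adjacent pairs, replacing A's
-- quadratic all-pairs counting loop (objective: faster).


-- ===== PORT A =====
-- literal port of A; words[i]/words[j] are read with pyGetD (exact here: i, j ∈ range(len(words)),
-- so the Python indexing never raises and the default "" is never used)
def check_phrase (words : List String) : Bool :=
  let l : Int := (words.length : Int)
  let x : Int := l * -1
  let x := (PySem.List.pyRange 0 l 1).foldl (fun x i =>
    (PySem.List.pyRange 0 l 1).foldl (fun x j =>
      if PySem.List.sorted (PySem.List.pyGetD words i "").toList (fun c => c) false
          = PySem.List.sorted (PySem.List.pyGetD words j "").toList (fun c => c) false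
      then x + 1 else x) x) x
  !(decide (x > 0))

-- ===== PORT B =====
-- literal port of Source B; signatures[1:] is `drop 1` (exact for this nonnegative slice start)
def check_phrase_alt (words : List String) : Bool :=
  let signatures := PySem.List.sorted
    (words.map (fun w => PySem.List.sorted w.toList (fun c => c) false)) (fun s => s) false
  (signatures.zip (signatures.drop 1)).all (fun p => !(p.1 == p.2))

-- ===== PRECONDITION & SPEC =====
def Spec_check_phrase (words : List String) (out : Bool) : Prop := out = check_phrase_alt words
instance (words : List String) (out : Bool) : Decidable (Spec_check_phrase words out) := by unfold Spec_check_phrase; infer_instance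

-- ===== CLAIM (what is proved, stated in full; the proofs are below) =====
def Claim_equal_check_phrase : Prop := ∀ (words : List String), Dom_check_phrase words → Spec_check_phrase words (check_phrase words)

-- ===== LEMMAS AND PROOFS =====

-- the anagram signature of one word (sorted(w), as both ports compute it)
def pvSig (w : String) : List Char := PySem.List.sorted w.toList (fun c => c) false

-- countP with a propositional equality test is count
theorem pv_countP_eq_count {α : Type} [DecidableEq α] (l : List α) (a : α) :
    l.countP (fun b => a = b) = l.count a := by
  rw [List.count_eq_countP']
  apply List.countP_congr
  intro b _
  by_cases h : a = b <;> simp [h]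
  exact fun hh => h hh.symm

-- a list of naturals, each ≥ 1, summing to at most its length, is all ones
theorem pv_all_one_of_sum_le {m : List Nat} (h1 : ∀ x ∈ m, 1 ≤ x)
    (h2 : m.sum ≤ m.length) : ∀ x ∈ m, x = 1 := by
  induction m with
  | nil => intro x hx; cases hx
  | cons a t ih =>
    have ht1 : ∀ x ∈ t, 1 ≤ x := fun x hx => h1 x (List.mem_cons_of_mem _ hx)
    have hlen : t.length ≤ t.sum := List.length_le_sum_of_one_le t ht1
    have ha : 1 ≤ a := h1 a (List.mem_cons_self)
    simp only [List.sum_cons, List.length_cons] at h2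
    intro x hx
    rcases List.mem_cons.mp hx with rfl | hx
    · omega
    · exact ih ht1 (by omega) x hx

-- A's total matching-pair count is ≤ the length iff the list has no duplicates
theorem pv_sum_counts_le_iff_nodup {α : Type} [DecidableEq α] (l : List α) :
    ((l.map (fun a => l.countP (fun b => a = b))).sum ≤ l.length) ↔ l.Nodup := by
  have hmap : l.map (fun a => l.countP (fun b => a = b)) = l.map (fun a => l.count a) :=
    List.map_congr_left (fun a _ => pv_countP_eq_count l a)
  rw [hmap]
  constructor
  · intro h
    rw [List.nodup_iff_count_eq_one]
    intro a ha
    have h1 : ∀ x ∈ l.map (fun a => l.count a), 1 ≤ x := by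
      intro x hx
      obtain ⟨b, hb, rfl⟩ := List.mem_map.mp hx
      exact List.count_pos_iff.mpr hb
    exact pv_all_one_of_sum_le h1 (by simpa using h) _ (List.mem_map.mpr ⟨a, ha, rfl⟩)
  · intro h
    rw [List.nodup_iff_count_eq_one] at h
    have : l.map (fun a => l.count a) = l.map (fun _ => 1) :=
      List.map_congr_left (fun a ha => h a ha)
    rw [this]
    simp

-- A's inner loop adds, to its accumulator, the number of words whose signature matches word i's
theorem pv_inner (words : List String) (x : Int) (i : Int) :
    (PySem.List.pyRange 0 (words.length : Int) 1).foldl (fun x j =>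
      if PySem.List.sorted (PySem.List.pyGetD words i "").toList (fun c => c) false
          = PySem.List.sorted (PySem.List.pyGetD words j "").toList (fun c => c) false
      then x + 1 else x) x
    = x + ((words.map pvSig).countP
            (fun b => pvSig (PySem.List.pyGetD words i "") = b) : Int) := by
  have hwords : List.map (fun j => PySem.List.pyGetD words j "") (PySem.List.pyRange 0 (words.length : Int)) = words := by
    simpa [PySem.List.len] using PySem.List.map_pyGetD_pyRange_zero words ""
  rw [PySem.List.foldl_ite_add_one
    (p := fun j => PySem.List.sorted (PySem.List.pyGetD words i "").toList (fun c => c) false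
          = PySem.List.sorted (PySem.List.pyGetD words j "").toList (fun c => c) false)]
  congr 1
  norm_cast
  show List.countP (fun j => decide (pvSig (PySem.List.pyGetD words i "") = pvSig (PySem.List.pyGetD words j ""))) (PySem.List.pyRange 0 (words.length : Int))
      = List.countP (fun b => decide (pvSig (PySem.List.pyGetD words i "") = b)) (words.map pvSig)
  set a := pvSig (PySem.List.pyGetD words i "") with ha
  conv_rhs => rw [List.countP_map, ← hwords, List.countP_map]
  rfl

-- A returns true iff its total pair count stays at (length of words)
theorem pv_checkA_eq (words : List String) :
    check_phrase words
      = decide ((((words.map pvSig).map (fun a => (words.map pvSig).countP (fun b => a = b))).sum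
          ≤ (words.map pvSig).length)) := by
  have hwords : List.map (fun j => PySem.List.pyGetD words j "") (PySem.List.pyRange 0 (words.length : Int)) = words := by
    simpa [PySem.List.len] using PySem.List.map_pyGetD_pyRange_zero words ""
  unfold check_phrase
  simp only [pv_inner]
  rw [PySem.List.foldl_add]
  set S := words.map pvSig with hS
  have hmap : List.map (fun i => ((S.countP (fun b => pvSig (PySem.List.pyGetD words i "") = b) : Nat) : Int)) (PySem.List.pyRange 0 (words.length : Int))
      = List.map (fun w => ((S.countP (fun b => pvSig w = b) : Nat) : Int)) words := by
    conv_rhs => rw [← hwords, List.map_map]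
    rfl
  rw [hmap]
  have hsum : (List.map (fun w => ((S.countP (fun b => pvSig w = b) : Nat) : Int)) words).sum
      = (((words.map pvSig).map (fun a => (words.map pvSig).countP (fun b => a = b))).sum : Nat) := by
    rw [hS, List.map_map, Nat.cast_list_sum, List.map_map]
    rfl
  rw [hsum]
  rw [Bool.eq_iff_iff]
  simp only [hS, Bool.not_eq_true', decide_eq_false_iff_not, decide_eq_true_eq, not_lt, List.length_map]
  omega

-- B's adjacency pass, as a Bool test, is the chain of adjacent disequalities
theorem pv_zip_all_iff_chain {α : Type} [BEq α] [LawfulBEq α] (l : List α) :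
    ((l.zip (l.drop 1)).all (fun p => !(p.1 == p.2)) = true) ↔ List.IsChain (·≠·) l := by
  induction l with
  | nil => simp
  | cons a t ih =>
    cases t with
    | nil => simp
    | cons b t' =>
      simp only [List.drop_one, List.tail_cons, List.zip_cons_cons, List.all_cons,
        List.isChain_cons_cons, Bool.and_eq_true] at *
      constructor
      · rintro ⟨h1, h2⟩
        exact ⟨by simpa using h1, ih.mp (by simpa [List.drop_one] using h2)⟩
      · rintro ⟨h1, h2⟩
        exact ⟨by simpa using h1, by simpa [List.drop_one] using ih.mpr h2⟩

-- on a ≤-sorted list, adjacent disequality is exactly Nodup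
theorem pv_chain_ne_iff_nodup {α : Type} [LinearOrder α] (l : List α)
    (hs : l.Pairwise (·≤·)) : List.IsChain (·≠·) l ↔ l.Nodup := by
  constructor
  · intro h
    have hlt : List.IsChain (·<·) l := by
      have hch : List.IsChain (·≤·) l := hs.isChain
      clear hs
      induction l with
      | nil => exact .nil
      | cons a t ih =>
        cases t with
        | nil => simp
        | cons b t' =>
          rw [List.isChain_cons_cons] at *
          exact ⟨lt_of_le_of_ne hch.1 h.1, ih h.2 hch.2⟩
    exact (List.isChain_iff_pairwise.mp hlt).imp ne_of_lt
  · intro h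
    exact List.Pairwise.isChain h

-- B returns true iff the signature list has no duplicates
theorem pv_checkB_eq (words : List String) :
    check_phrase_alt words = decide ((words.map pvSig).Nodup) := by
  unfold check_phrase_alt
  rw [Bool.eq_iff_iff]
  simp only [decide_eq_true_eq]
  rw [pv_zip_all_iff_chain]
  have hp : (PySem.List.sorted (List.map (fun w => PySem.List.sorted w.toList (fun c => c) false) words) (fun s => s) false).Pairwise (fun a b : List Char => a ≤ b) := by
    have h := PySem.List.sorted_pairwise (κ := List Char)
      (List.map (fun w => PySem.List.sorted w.toList (fun c => c) false) words) (fun s => s)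
    convert h using 2
  rw [pv_chain_ne_iff_nodup _ hp]
  exact (PySem.List.sorted_perm _ _ _).nodup_iff

-- ===== VERDICT (by name: the statement is the Claim_ definition above) =====
theorem check_phrase_spec : Claim_equal_check_phrase := by
  intro words _
  unfold Spec_check_phrase
  rw [pv_checkA_eq, pv_checkB_eq, decide_eq_decide]
  exact pv_sum_counts_le_iff_nodup _
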